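-- pv_equiv track=rewrite | github.com/lxa2015/lxa-jg-rewrite | lxa5-suffixUnicode.py | DeltaLeft
-- ===== SOURCE A (Python) =====
-- def DeltaLeft(a, b):
--     howfar = len(a)
--     if len(b) < howfar:
--         howfar = len(b)
--     for i in range(howfar - 1, 0, -1):
--         if not a[i] == b[i]:
--             return (a[:i], b[:i])
--     return (a[:howfar], b[:howfar])
-- ===== SOURCE B (Python) =====
-- def DeltaLeft(a, b):
--     howfar = min(len(a), len(b))
--     cut = howfar
--     for i in range(1, howfar):
--         if a[i] != b[i]:
--             cut = i
--     return (a[:cut], b[:cut])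
-- ===== Notes on version B (the rewrite author's own statement) =====
-- stated objective: alternative
-- what changed: Replaces A's backward scan with early return by a single forward pass that threads the highest differing index through an accumulator (initialised to min(len(a),len(b))), then slices once at the end.
import Mathlib
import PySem

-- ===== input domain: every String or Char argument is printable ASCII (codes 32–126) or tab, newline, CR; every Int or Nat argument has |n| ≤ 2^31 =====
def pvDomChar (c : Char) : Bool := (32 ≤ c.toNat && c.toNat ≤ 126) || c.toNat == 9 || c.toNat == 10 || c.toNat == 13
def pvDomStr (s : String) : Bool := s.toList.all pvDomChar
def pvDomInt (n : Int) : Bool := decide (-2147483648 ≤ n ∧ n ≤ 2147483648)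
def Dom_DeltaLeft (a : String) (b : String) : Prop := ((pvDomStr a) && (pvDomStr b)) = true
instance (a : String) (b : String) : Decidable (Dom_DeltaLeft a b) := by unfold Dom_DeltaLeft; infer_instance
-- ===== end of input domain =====

-- B replaces A's backward scan + early return by a forward pass threading the highest
-- differing index through an accumulator; same O(n) cost, different decomposition.

-- ===== PORT A =====
-- the for-loop over range(howfar-1, 0, -1) with its early return
def DeltaLeftLoopA (al bl : List Char) : List Int → Option (String × String)
  | [] => none
  | i :: rest =>
      if ¬ (PySem.List.pyGet? al i = PySem.List.pyGet? bl i) then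
        some (String.mk (PySem.Chars.slice al none (some i)),
              String.mk (PySem.Chars.slice bl none (some i)))
      else DeltaLeftLoopA al bl rest

def DeltaLeft (a : String) (b : String) : String × String :=
  let al := a.toList
  let bl := b.toList
  let howfar0 : Int := PySem.Chars.len al
  let howfar : Int := if PySem.Chars.len bl < howfar0 then PySem.Chars.len bl else howfar0
  match DeltaLeftLoopA al bl (PySem.List.pyRange (howfar - 1) 0 (-1)) with
  | some r => r
  | none => (String.mk (PySem.Chars.slice al none (some howfar)),
             String.mk (PySem.Chars.slice bl none (some howfar)))

-- ===== PORT B =====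
def DeltaLeft_alt (a : String) (b : String) : String × String :=
  let al := a.toList
  let bl := b.toList
  let howfar : Int := min (PySem.Chars.len al) (PySem.Chars.len bl)
  let cut : Int := (PySem.List.pyRange 1 howfar 1).foldl
      (fun c i => if ¬ (PySem.List.pyGet? al i = PySem.List.pyGet? bl i) then i else c) howfar
  (String.mk (PySem.Chars.slice al none (some cut)),
   String.mk (PySem.Chars.slice bl none (some cut)))

-- ===== PRECONDITION & SPEC =====
def Spec_DeltaLeft (a : String) (b : String) (out : String × String) : Prop := out = DeltaLeft_alt a b
instance (a : String) (b : String) (out : String × String) : Decidable (Spec_DeltaLeft a b out) := by unfold Spec_DeltaLeft; infer_instance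

-- ===== CLAIM (what is proved, stated in full; the proofs are below) =====
def Claim_equal_DeltaLeft : Prop := ∀ (a : String) (b : String), Dom_DeltaLeft a b → Spec_DeltaLeft a b (DeltaLeft a b)

-- ===== LEMMAS AND PROOFS =====

-- a forward fold keeping the last p-hit equals the first p-hit of the reversed list
theorem foldl_last_hit (p : Int → Prop) [DecidablePred p] (l : List Int) (c0 : Int) :
    l.foldl (fun c i => if p i then i else c) c0 =
      (l.reverse.find? (fun i => decide (p i))).getD c0 := by
  induction l generalizing c0 with
  | nil => rfl
  | cons x xs ih =>
      simp only [List.foldl_cons, List.reverse_cons, List.find?_append]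
      rw [ih]
      cases h : xs.reverse.find? (fun i => decide (p i)) with
      | some i => simp
      | none =>
          simp only [Option.none_or]
          by_cases hp : p x <;> simp [List.find?, hp]

theorem loopA_eq_find (al bl : List Char) (l : List Int) :
    DeltaLeftLoopA al bl l =
      (l.find? (fun i => ¬ (PySem.List.pyGet? al i = PySem.List.pyGet? bl i))).map
        (fun i => (String.mk (PySem.Chars.slice al none (some i)),
                   String.mk (PySem.Chars.slice bl none (some i)))) := by
  induction l with
  | nil => rfl
  | cons x xs ih =>
      by_cases h : PySem.List.pyGet? al x = PySem.List.pyGet? bl x <;>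
        simp [DeltaLeftLoopA, List.find?, h, ih]

-- ===== VERDICT (by name: the statement is the Claim_ definition above) =====
theorem DeltaLeft_spec : Claim_equal_DeltaLeft := by
  intro a b _
  unfold Spec_DeltaLeft DeltaLeft DeltaLeft_alt
  simp only []
  set al := a.toList
  set bl := b.toList
  have hmin : (if PySem.Chars.len bl < PySem.Chars.len al then PySem.Chars.len bl
      else PySem.Chars.len al) = min (PySem.Chars.len al) (PySem.Chars.len bl) := by
    simp only [PySem.Chars.len_eq]
    omega
  rw [hmin]
  set h := min (PySem.Chars.len al) (PySem.Chars.len bl) with hh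
  have hrev : PySem.List.pyRange (h - 1) 0 (-1) = (PySem.List.pyRange 1 h 1).reverse := by
    have := PySem.List.pyRange_neg_one_eq_reverse (h - 1) 0
    simpa using this
  rw [hrev, loopA_eq_find,
      foldl_last_hit (fun i => ¬ (PySem.List.pyGet? al i = PySem.List.pyGet? bl i))]
  cases hf : (PySem.List.pyRange 1 h 1).reverse.find?
      (fun i => ¬ (PySem.List.pyGet? al i = PySem.List.pyGet? bl i)) with
  | none => simp [hf]
  | some i => simp [hf]
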